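-- pv_equiv track=rewrite | github.com/Sleanview/Study | 备份/作业-写函数.py | process_Func
-- ===== SOURCE A (Python) =====
-- def process_Func(con):
--     listnew=[]
--     index=1
--     for i in con:
--         if index%2==1: # 判断奇数位
--             listnew.append(i)
--             pass
--         index+=1
--         pass
--     return listnew
-- ===== SOURCE B (Python) =====
-- def process_Func(con):
--     return list(con)[::2]
-- ===== Notes on version B (the rewrite author's own statement) =====
-- stated objective: simpler
-- what changed: Replaces the explicit loop with a 1-based index counter and parity test by a single stride slice [::2] over the materialized list; the slice runs at C level so it is also measurably faster.
import Mathlib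
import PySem

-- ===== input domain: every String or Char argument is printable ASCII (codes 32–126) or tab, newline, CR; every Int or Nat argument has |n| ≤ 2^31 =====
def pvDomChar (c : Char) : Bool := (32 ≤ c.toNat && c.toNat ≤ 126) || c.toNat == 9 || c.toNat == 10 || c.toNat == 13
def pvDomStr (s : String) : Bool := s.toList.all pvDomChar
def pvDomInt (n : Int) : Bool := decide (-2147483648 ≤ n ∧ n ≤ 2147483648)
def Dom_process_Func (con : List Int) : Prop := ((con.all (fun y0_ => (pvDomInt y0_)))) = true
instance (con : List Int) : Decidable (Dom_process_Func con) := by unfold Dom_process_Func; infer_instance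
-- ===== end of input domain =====

-- B replaces A's explicit loop with index counter and parity test by a single stride slice [::2]; objective: simpler.


-- ===== PORT A =====
-- loop state: (listnew, index); branch 'index % 2 == 1' appends, then index += 1
def process_Func (con : List Int) : List Int :=
  (con.foldl
    (fun (st : List Int × Int) i =>
      ((if PySem.Int.mod st.2 2 == 1 then st.1 ++ [i] else st.1), st.2 + 1))
    ([], 1)).1

-- ===== PORT B =====
-- list(con)[::2] : stride slice with step 2
def process_Func_alt (con : List Int) : List Int :=
  (PySem.List.slice? con none none 2).getD []

-- ===== PRECONDITION & SPEC =====
def Spec_process_Func (con : List Int) (out : List Int) : Prop := out = process_Func_alt con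
instance (con : List Int) (out : List Int) : Decidable (Spec_process_Func con out) := by unfold Spec_process_Func; infer_instance

-- ===== CLAIM (what is proved, stated in full; the proofs are below) =====
def Claim_equal_process_Func : Prop := ∀ (con : List Int), Dom_process_Func con → Spec_process_Func con (process_Func con)

-- ===== LEMMAS AND PROOFS =====

-- common characterization: every second element, starting with the first
def everyOther : List Int → List Int
  | [] => []
  | [x] => [x]
  | x :: _ :: r => x :: everyOther r

theorem foldl_everyOther (xs : List Int) : ∀ (acc : List Int) (i : Int),
    i % 2 = 1 →
    (xs.foldl
      (fun (st : List Int × Int) x =>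
        ((if st.2 % 2 = 1 then st.1 ++ [x] else st.1), st.2 + 1))
      (acc, i)).1 = acc ++ everyOther xs := by
  induction xs using everyOther.induct with
  | case1 => simp [everyOther]
  | case2 x =>
      intro acc i h
      simp [everyOther, List.foldl, h]
  | case3 x y r ih =>
      intro acc i h
      have h1 : ¬ (i + 1) % 2 = 1 := by omega
      have h2 : (i + 2) % 2 = 1 := by omega
      rw [List.foldl_cons, List.foldl_cons]
      simp only [if_pos h, if_neg h1]
      rw [show i + 1 + 1 = i + 2 from by ring, ih (acc ++ [x]) (i + 2) h2]
      simp [everyOther]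

theorem filterMap_everyOther (ys : List Int) :
    List.filterMap (fun k : Nat => ys[(2 * (k : Int)).toNat]?)
      (List.range (((ys.length : Int) + 1) / 2).toNat) = everyOther ys := by
  induction ys using everyOther.induct with
  | case1 => simp [everyOther]
  | case2 x =>
      simp [everyOther, List.range_succ]
  | case3 x y r ih =>
      have hc : ((((x :: y :: r).length : Int) + 1) / 2).toNat
          = (((r.length : Int) + 1) / 2).toNat + 1 := by
        simp only [List.length_cons]; push_cast; omega
      rw [hc, List.range_succ_eq_map, List.filterMap_cons, List.filterMap_map]
      have h0 : (x :: y :: r)[(2 * ((0 : Nat) : Int)).toNat]? = some x := by norm_num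
      rw [h0]
      have hrec : List.filterMap
          ((fun k : Nat => (x :: y :: r)[(2 * (k : Int)).toNat]?) ∘ Nat.succ)
          (List.range (((r.length : Int) + 1) / 2).toNat)
          = List.filterMap (fun k : Nat => r[(2 * (k : Int)).toNat]?)
              (List.range (((r.length : Int) + 1) / 2).toNat) := by
        apply List.filterMap_congr
        intro k _
        have h2 : (2 * ((k.succ : Nat) : Int)).toNat = (2 * (k : Int)).toNat + 2 := by
          push_cast; omega
        simp only [Function.comp, h2]
        rfl
      rw [hrec, ih]
      simp [everyOther]

theorem slice2_everyOther (xs : List Int) :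
    (PySem.List.slice? xs none none 2).getD [] = everyOther xs := by
  simp only [PySem.List.slice?, PySem.List.sliceIndices]
  norm_num
  by_cases hpos : 0 < xs.length
  · simp only [if_pos hpos]
    have : (((xs.length : Int) + 2 - 1) / 2).toNat = (((xs.length : Int) + 1) / 2).toNat := by
      omega
    rw [this]
    exact filterMap_everyOther xs
  · have : xs = [] := by
      cases xs with
      | nil => rfl
      | cons a l => exact absurd (by simp) hpos
    subst this
    simp [everyOther]

-- ===== VERDICT (by name: the statement is the Claim_ definition above) =====
theorem process_Func_spec : Claim_equal_process_Func := by
  intro con _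
  unfold Spec_process_Func process_Func process_Func_alt
  rw [slice2_everyOther]
  have hfun : (fun (st : List Int × Int) i =>
      ((if PySem.Int.mod st.2 2 == 1 then st.1 ++ [i] else st.1), st.2 + 1))
      = (fun (st : List Int × Int) i =>
      ((if st.2 % 2 = 1 then st.1 ++ [i] else st.1), st.2 + 1)) := by
    funext st i
    simp [PySem.Int.mod, Int.fmod_eq_emod]
  rw [hfun]
  simpa using foldl_everyOther con [] 1 (by decide)
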